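-- pv_equiv track=rewrite | github.com/minor-league/minor-league | crawling_and_recommendation/recommendation.py | filter_tag
-- ===== SOURCE A (Python) =====
-- def filter_tag(tags,inputs,rst):
-- 	size = len(tags)
--
-- 	l = []
-- 	s1 = set()
--
-- 	for input in inputs:
-- 		s1 |= set(tags[input])
--
-- 	for r in range(size):
-- 		s2 = set(tags[r])
-- 		inter = len(s1&s2)
-- 		l.append([inter,r])
--
-- 	l = sorted(l,key = lambda x : x[0],reverse = True)
--
-- 	return [x[0] for x in l]
-- ===== SOURCE B (Python) =====
-- def filter_tag(tags, inputs, rst):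
--     size = len(tags)
--
--     # inverted index: tag -> rows (each row once) whose tag set contains it
--     index = {}
--     for r in range(size):
--         for tag in set(tags[r]):
--             index.setdefault(tag, []).append(r)
--
--     s1 = set()
--     for i in inputs:
--         s1 |= set(tags[i])
--
--     counts = [0] * size
--     for tag in s1:
--         for r in index.get(tag, []):
--             counts[r] += 1
--
--     return sorted(counts, reverse=True)
-- ===== Notes on version B (the rewrite author's own statement) =====
-- stated objective: alternative
-- what changed: B replaces A's per-row set-intersection pass by an inverted index (tag -> rows) built once, then increments per-row counters while scanning the unioned query tags, and sorts the counter array directly instead of sorting [count,row] pairs.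
import Mathlib
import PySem

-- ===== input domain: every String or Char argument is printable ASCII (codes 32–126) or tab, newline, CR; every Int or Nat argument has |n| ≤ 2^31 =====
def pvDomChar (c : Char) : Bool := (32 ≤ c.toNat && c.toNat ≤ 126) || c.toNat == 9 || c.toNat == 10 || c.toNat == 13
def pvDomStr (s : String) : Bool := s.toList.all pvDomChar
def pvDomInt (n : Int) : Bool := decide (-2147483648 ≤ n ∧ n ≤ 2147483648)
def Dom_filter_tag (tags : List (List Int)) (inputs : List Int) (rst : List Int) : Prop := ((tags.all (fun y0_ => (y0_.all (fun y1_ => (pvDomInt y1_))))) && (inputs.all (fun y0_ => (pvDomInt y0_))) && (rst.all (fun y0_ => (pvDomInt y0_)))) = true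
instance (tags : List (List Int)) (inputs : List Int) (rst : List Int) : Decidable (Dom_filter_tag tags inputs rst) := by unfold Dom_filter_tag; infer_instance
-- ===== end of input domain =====

-- B replaces the per-row set-intersection pass by an inverted index (tag → rows) with
-- per-row counters; alternative decomposition, same return value.

-- ===== PORT A =====
def filter_tag (tags : List (List Int)) (inputs : List Int) (rst : List Int) : List Int :=
  let size := tags.length
  let s1 : PySem.Set Int :=
    inputs.foldl (fun s i => PySem.Set.union s (PySem.Set.ofList (PySem.List.pyGetD tags i []))) PySem.Set.empty
  let l : List (Int × Int) :=
    (PySem.List.pyRange 0 (size : Int)).foldl (fun acc r =>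
      let s2 : PySem.Set Int := PySem.Set.ofList (PySem.List.pyGetD tags r [])
      let inter : Int := (PySem.Set.inter s1 s2).length
      acc ++ [(inter, r)]) []
  (PySem.List.sorted l (fun x => x.1) true).map (fun x => x.1)

-- ===== PORT B =====
def filter_tag_alt (tags : List (List Int)) (inputs : List Int) (rst : List Int) : List Int :=
  let size := tags.length
  let index : PySem.Dict Int (List Nat) :=
    (List.range size).foldl (fun d r =>
      (PySem.Set.ofList (tags.getD r [])).foldl
        (fun d tag => d.insert tag (d.getD tag [] ++ [r])) d)
      PySem.Dict.empty
  let s1 : PySem.Set Int :=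
    inputs.foldl (fun s i => PySem.Set.union s (PySem.Set.ofList (PySem.List.pyGetD tags i []))) PySem.Set.empty
  let counts : List Int :=
    s1.foldl (fun counts tag =>
      (index.getD tag []).foldl (fun counts r => counts.set r (counts.getD r 0 + 1)) counts)
      (List.replicate size 0)
  PySem.List.sorted counts (fun x => x) true

-- ===== PRECONDITION & SPEC =====
-- Pre_ excludes exactly the inputs on which the Python A raises IndexError: an element of
-- `inputs` that is not a valid (possibly negative) index into `tags`.
def Pre_filter_tag (tags : List (List Int)) (inputs : List Int) (rst : List Int) : Prop :=
  ∀ i ∈ inputs, -(tags.length : Int) ≤ i ∧ i < (tags.length : Int)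
instance (tags : List (List Int)) (inputs : List Int) (rst : List Int) : Decidable (Pre_filter_tag tags inputs rst) := by unfold Pre_filter_tag; infer_instance

def pvWitness_filter_tag : List (List Int) × List Int × List Int :=
  ([[1, 2], [2, 3], [4]], [0, -1], [7])

def Spec_filter_tag (tags : List (List Int)) (inputs : List Int) (rst : List Int) (out : List Int) : Prop := out = filter_tag_alt tags inputs rst
instance (tags : List (List Int)) (inputs : List Int) (rst : List Int) (out : List Int) : Decidable (Spec_filter_tag tags inputs rst out) := by unfold Spec_filter_tag; infer_instance

-- ===== CLAIM (what is proved, stated in full; the proofs are below) =====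
def Claim_equal_filter_tag : Prop := ∀ (tags : List (List Int)) (inputs : List Int) (rst : List Int), Dom_filter_tag tags inputs rst → Pre_filter_tag tags inputs rst → Spec_filter_tag tags inputs rst (filter_tag tags inputs rst)

-- ===== LEMMAS AND PROOFS =====

-- number of tags of row r that also occur in s1 (the common per-row value)
def pvRowCount (tags : List (List Int)) (s1 : PySem.Set Int) (r : Nat) : Int :=
  (s1.countP (fun t => decide (t ∈ tags.getD r [])) : Int)

-- the inner index-building fold, on the getD of one tag
lemma pv_inner_ne (k : Nat) (ts : List Int) (d : PySem.Dict Int (List Nat)) (tag : Int)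
    (h : tag ∉ ts) :
    ((ts.foldl (fun d t => d.insert t (d.getD t [] ++ [k])) d).getD tag []) = d.getD tag [] := by
  induction ts generalizing d with
  | nil => rfl
  | cons t ts ih =>
    simp only [List.mem_cons, not_or] at h
    simp only [List.foldl_cons, ih _ h.2, PySem.Dict.getD_insert]
    simp [h.1]

lemma pv_inner (k : Nat) (ts : List Int) (d : PySem.Dict Int (List Nat)) (tag : Int)
    (hnd : ts.Nodup) :
    ((ts.foldl (fun d t => d.insert t (d.getD t [] ++ [k])) d).getD tag []) =
      if tag ∈ ts then d.getD tag [] ++ [k] else d.getD tag [] := by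
  induction ts generalizing d with
  | nil => rfl
  | cons t ts ih =>
    rcases List.nodup_cons.mp hnd with ⟨hni, hnd'⟩
    by_cases htag : tag = t
    · subst htag
      simp only [List.foldl_cons, pv_inner_ne k ts _ tag hni, PySem.Dict.getD_insert]
      simp
    · simp only [List.foldl_cons, ih _ hnd', PySem.Dict.getD_insert, if_neg htag]
      simp [htag]

-- characterization of the inverted index
lemma pv_index_getD (tags : List (List Int)) (n : Nat) (tag : Int) :
    (((List.range n).foldl (fun d r =>
        (PySem.Set.ofList (tags.getD r [])).foldl
          (fun d t => d.insert t (d.getD t [] ++ [r])) d)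
        PySem.Dict.empty).getD tag []) =
      (List.range n).filter (fun r => decide (tag ∈ tags.getD r [])) := by
  induction n with
  | zero => rfl
  | succ n ih =>
    rw [List.range_succ, List.foldl_append, List.filter_append, List.foldl_cons, List.foldl_nil,
      pv_inner n _ _ tag (PySem.Set.nodup_ofList _), ih]
    by_cases h : tag ∈ tags.getD n []
    · rw [if_pos ((PySem.Set.mem_ofList _ _).mpr h)]
      simp [List.getD] at h ⊢
      simp [h]
    · rw [if_neg (fun hc => h ((PySem.Set.mem_ofList _ _).mp hc))]
      simp [List.getD] at h ⊢
      simp [h]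

-- the increment fold preserves length
lemma pv_incr_length (L : List Nat) (c : List Int) :
    (L.foldl (fun c r => c.set r (c.getD r 0 + 1)) c).length = c.length := by
  induction L generalizing c with
  | nil => rfl
  | cons r L ih => rw [List.foldl_cons, ih, List.length_set]

-- the increment fold, pointwise
lemma pv_incr_getD (L : List Nat) (c : List Int) (j : Nat)
    (h : ∀ r ∈ L, r < c.length) :
    (L.foldl (fun c r => c.set r (c.getD r 0 + 1)) c).getD j 0 =
      c.getD j 0 + (L.count j : Int) := by
  induction L generalizing c with
  | nil => simp
  | cons r L ih =>
    have hr : r < c.length := h r (by simp)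
    have h' : ∀ x ∈ L, x < (c.set r (c.getD r 0 + 1)).length := by
      simpa using fun x hx => h x (by simp [hx])
    rw [List.foldl_cons, ih _ h']
    by_cases hj : j = r
    · subst hj
      rw [List.getD_eq_getElem?_getD, List.getElem?_set_self (by simpa using hr)]
      simp [List.count_cons, List.getD_eq_getElem?_getD]
      ring
    · rw [List.getD_eq_getElem?_getD, List.getElem?_set_ne (fun hc => hj hc.symm)]
      simp [Ne.symm hj, List.getD_eq_getElem?_getD]

-- the counting loop over s1, pointwise
lemma pv_counts_getD (tags : List (List Int)) (s1 : List Int) (c : List Int) (j : Nat)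
    (hlen : c.length = tags.length) :
    (s1.foldl (fun c tag =>
        ((((List.range tags.length).foldl (fun d r =>
            (PySem.Set.ofList (tags.getD r [])).foldl
              (fun d t => d.insert t (d.getD t [] ++ [r])) d)
            PySem.Dict.empty).getD tag [])).foldl
          (fun c r => c.set r (c.getD r 0 + 1)) c) c).getD j 0 =
      c.getD j 0 + (s1.countP (fun t => decide (t ∈ tags.getD j [])) : Int) := by
  induction s1 generalizing c with
  | nil => simp
  | cons tag s1 ih =>
    have hmem : ∀ r ∈ ((List.range tags.length).foldl (fun d r =>
        (PySem.Set.ofList (tags.getD r [])).foldl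
          (fun d t => d.insert t (d.getD t [] ++ [r])) d)
        PySem.Dict.empty).getD tag [], r < c.length := by
      rw [pv_index_getD]
      intro r hr
      rw [hlen]
      exact List.mem_range.mp (List.mem_of_mem_filter hr)
    have hlen' : (((((List.range tags.length).foldl (fun d r =>
        (PySem.Set.ofList (tags.getD r [])).foldl
          (fun d t => d.insert t (d.getD t [] ++ [r])) d)
        PySem.Dict.empty).getD tag [])).foldl
          (fun c r => c.set r (c.getD r 0 + 1)) c).length = tags.length := by
      rw [pv_incr_length, hlen]
    rw [List.foldl_cons, ih _ hlen', pv_incr_getD _ _ _ hmem, pv_index_getD]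
    have hcnt : (((List.range tags.length).filter
        (fun r => decide (tag ∈ tags.getD r []))).count j : Int) =
        if tag ∈ tags.getD j [] then 1 else 0 := by
      by_cases ht : tag ∈ tags.getD j []
      · have hj : j < tags.length := by
          by_contra hj
          rw [List.getD_eq_getElem?_getD, List.getElem?_eq_none (by omega)] at ht
          exact absurd ht (by simp)
        rw [List.count_filter (by simpa using ht), if_pos ht]
        exact_mod_cast List.count_eq_one_of_mem List.nodup_range (List.mem_range.mpr hj)
      · have hnm : j ∉ (List.range tags.length).filter
            (fun r => decide (tag ∈ tags.getD r [])) := by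
          intro hc
          exact ht (of_decide_eq_true (List.mem_filter.mp hc).2)
        rw [List.count_eq_zero.mpr hnm, if_neg ht]
        rfl
    rw [hcnt, List.countP_cons]
    by_cases ht : tag ∈ tags.getD j [] <;> push_cast <;> simp [ht] <;> ring

-- the counting loop preserves length
lemma pv_counts_length (tags : List (List Int)) (s1 : List Int) (c : List Int) :
    (s1.foldl (fun c tag =>
        ((((List.range tags.length).foldl (fun d r =>
            (PySem.Set.ofList (tags.getD r [])).foldl
              (fun d t => d.insert t (d.getD t [] ++ [r])) d)
            PySem.Dict.empty).getD tag [])).foldl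
          (fun c r => c.set r (c.getD r 0 + 1)) c) c).length = c.length := by
  induction s1 generalizing c with
  | nil => rfl
  | cons tag s1 ih => rw [List.foldl_cons, ih, pv_incr_length]

-- A's per-row intersection size equals the countP value
lemma pv_inter_eq (tags : List (List Int)) (s1 : PySem.Set Int) (r : Nat) :
    ((PySem.Set.inter s1 (PySem.Set.ofList (PySem.List.pyGetD tags (r : Int) []))).length : Int) =
      pvRowCount tags s1 r := by
  rw [PySem.List.pyGetD_natCast]
  unfold pvRowCount PySem.Set.inter
  rw [← List.countP_eq_length_filter]
  congr 1
  apply List.countP_congr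
  intro t _
  constructor
  · intro h
    exact decide_eq_true ((PySem.Set.mem_ofList _ _).mp (by simpa using h))
  · intro h
    simpa using (PySem.Set.mem_ofList _ _).mpr (of_decide_eq_true h)

-- the heart of the equivalence, on the shared s1
lemma pv_main (tags : List (List Int)) (s1 : PySem.Set Int) :
    ((PySem.List.sorted ((PySem.List.pyRange 0 (tags.length : Int)).foldl (fun acc r =>
        acc ++ [(((PySem.Set.inter s1 (PySem.Set.ofList (PySem.List.pyGetD tags r []))).length : Int), r)]) [])
      (fun x => x.1) true).map (fun x => x.1)) =
    PySem.List.sorted (s1.foldl (fun counts tag =>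
        ((((List.range tags.length).foldl (fun d r =>
            (PySem.Set.ofList (tags.getD r [])).foldl
              (fun d t => d.insert t (d.getD t [] ++ [r])) d) PySem.Dict.empty).getD tag [])).foldl
          (fun counts r => counts.set r (counts.getD r 0 + 1)) counts)
        (List.replicate tags.length (0:Int))) (fun x => x) true := by
  rw [PySem.List.foldl_append_singleton_eq_map
      (f := fun r => (((PySem.Set.inter s1 (PySem.Set.ofList (PySem.List.pyGetD tags r []))).length : Int), r)),
    List.nil_append]
  -- B's counts list is the per-row count list
  have hcounts : (s1.foldl (fun counts tag =>
        ((((List.range tags.length).foldl (fun d r =>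
            (PySem.Set.ofList (tags.getD r [])).foldl
              (fun d t => d.insert t (d.getD t [] ++ [r])) d) PySem.Dict.empty).getD tag [])).foldl
          (fun counts r => counts.set r (counts.getD r 0 + 1)) counts)
        (List.replicate tags.length (0:Int))) =
      (List.range tags.length).map (pvRowCount tags s1) := by
    have hlen : (s1.foldl (fun counts tag =>
        ((((List.range tags.length).foldl (fun d r =>
            (PySem.Set.ofList (tags.getD r [])).foldl
              (fun d t => d.insert t (d.getD t [] ++ [r])) d) PySem.Dict.empty).getD tag [])).foldl
          (fun counts r => counts.set r (counts.getD r 0 + 1)) counts)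
        (List.replicate tags.length (0:Int))).length = tags.length := by
      rw [pv_counts_length, List.length_replicate]
    apply List.ext_getElem
    · rw [hlen, List.length_map, List.length_range]
    · intro i h1 h2
      rw [← List.getD_eq_getElem _ 0 h1,
        pv_counts_getD tags s1 _ i (by rw [List.length_replicate])]
      have hi : i < tags.length := by rw [hlen] at h1; exact h1
      simp [pvRowCount, hi]
  rw [hcounts]
  -- A's projected pair list is the same per-row count list
  have hmapeq : (((PySem.List.pyRange 0 (tags.length : Int)).map (fun r =>
      (((PySem.Set.inter s1 (PySem.Set.ofList (PySem.List.pyGetD tags r []))).length : Int), r))).map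
        (fun x => x.1)) = (List.range tags.length).map (pvRowCount tags s1) := by
    rw [PySem.List.pyRange_zero_natCast, List.map_map, List.map_map]
    apply List.map_congr_left
    intro k _
    exact pv_inter_eq tags s1 k
  -- two descending rearrangements of the same list are equal
  apply PySem.List.eq_of_perm_of_pairwise_le_of_injective (fun x : Int => -x) neg_injective
  · refine ((PySem.List.sorted_perm _ _ _).map _).trans (.trans ?_ (PySem.List.sorted_perm _ _ _).symm)
    rw [hmapeq]
  · exact (List.pairwise_map.mpr ((PySem.List.sorted_pairwise_rev _ _).imp (by intro a b h; omega)))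
  · exact ((PySem.List.sorted_pairwise_rev _ _).imp (by intro a b h; omega))

-- ===== VERDICT (by name: the statement is the Claim_ definition above) =====
theorem filter_tag_spec : Claim_equal_filter_tag := by
  intro tags inputs rst _ _
  exact pv_main tags
    (inputs.foldl (fun s i => PySem.Set.union s (PySem.Set.ofList (PySem.List.pyGetD tags i []))) PySem.Set.empty)
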